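-- pv_equiv track=rewrite | github.com/zamerets/DICT_python_education_Vladyslav_Zamerets | regular_exp.py | check_one_by_one
-- ===== SOURCE A (Python) =====
-- def check_single_char(pattern, character, literal=False):
--     if not literal:
--         return (pattern == character) or (pattern == '.') or (pattern == '')
--     return pattern == character
--
-- def check_one_by_one(pattern, text):
--     if len(pattern) == 0:
--         return True
--     elif pattern == '$' and len(text) == 0:
--         return True
--     elif len(text) == 0:
--         return False
--
--
--     if pattern.startswith('\\'):
--         if pattern[1] in '.?+*\\':
--             return check_single_char(pattern[1], text[:1], literal=True) and check_one_by_one(pattern[2:], text[1:])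
--     else:
--         return check_single_char(pattern[:1], text[:1]) and check_one_by_one(pattern[1:], text[1:])
-- ===== SOURCE B (Python) =====
-- def check_one_by_one(pattern, text):
--     # Compile the pattern into (literal, char) tokens, then match them
--     # against the text position by position.
--     tokens = []
--     i = 0
--     while i < len(pattern):
--         if pattern[i] == '\\':
--             if i + 1 >= len(pattern) or pattern[i + 1] not in '.?+*\\':
--                 raise ValueError('bad escape in pattern')
--             tokens.append((True, pattern[i + 1]))
--             i += 2
--         else:
--             tokens.append((False, pattern[i]))
--             i += 1
--     for j, (literal, char) in enumerate(tokens):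
--         if j >= len(text):
--             return tokens[j:] == [(False, '$')]
--         if literal:
--             if char != text[j]:
--                 return False
--         elif char != '.' and char != text[j]:
--             return False
--     return True
-- ===== Notes on version B (the rewrite author's own statement) =====
-- stated objective: alternative
-- what changed: B compiles the whole pattern into (literal, char) tokens first and then matches the token list against the text by position in one flat index-based pass (no repeated slicing), instead of A's interleaved slice-and-recurse; Pre_ excludes ill-formed patterns (a backslash followed by a non-escapable character or ending the pattern), on which A's outcome (None, False or IndexError, depending on where the text runs out) is an accident of its recursion, while B rejects them up front with ValueError.
-- outside the precondition, e.g. on check_one_by_one('\\q', 'x'): A returns None, B raises ValueError; on check_one_by_one('a\\', ''): A returns False, B raises ValueError; on check_one_by_one('\\', 'x'): A raises IndexError, B raises ValueError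
import Mathlib
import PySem

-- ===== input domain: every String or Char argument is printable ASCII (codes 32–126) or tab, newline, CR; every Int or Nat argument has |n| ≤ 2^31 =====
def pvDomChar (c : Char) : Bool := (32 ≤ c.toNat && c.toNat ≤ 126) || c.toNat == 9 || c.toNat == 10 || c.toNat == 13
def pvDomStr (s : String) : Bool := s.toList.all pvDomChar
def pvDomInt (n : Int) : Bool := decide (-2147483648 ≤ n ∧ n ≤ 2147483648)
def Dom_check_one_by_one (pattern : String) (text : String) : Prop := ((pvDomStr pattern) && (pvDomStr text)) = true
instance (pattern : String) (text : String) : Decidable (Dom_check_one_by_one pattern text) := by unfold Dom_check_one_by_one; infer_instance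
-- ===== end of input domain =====

-- B compiles the pattern into tokens once and matches them against the text in one flat pass,
-- instead of A's interleaved slice-and-recurse (proved equal on Pre_).

-- ===== PORT A =====
-- helper: check_single_char(pattern, character, literal) on 0/1-char strings (as List Char)
def check_single_char (pattern : List Char) (character : List Char) (literal : Bool) : Bool :=
  if !literal then pattern == character || pattern == ['.'] || pattern == []
  else pattern == character

-- core of A on List Char; guards in A's source order
def checkA : List Char → List Char → Option Bool
  | [], _ => some true                      -- len(pattern) == 0
  | p0 :: prest, [] =>                      -- len(text) == 0: True iff pattern == '$'
      if p0 = '$' ∧ prest = [] then some true else some false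
  | p0 :: prest, t0 :: trest =>
      if p0 = '\\' then                     -- pattern.startswith('\\')
        match prest with
        | [] => some false                  -- pattern[1]: IndexError (excluded by Pre_; dummy value)
        | c :: prest' =>
          if c = '.' ∨ c = '?' ∨ c = '+' ∨ c = '*' ∨ c = '\\' then  -- pattern[1] in '.?+*\'
            if check_single_char [c] [t0] true then checkA prest' trest else some false
          else none                         -- falls off the function: returns None
      else
        if check_single_char [p0] [t0] false then checkA prest trest else some false

def check_one_by_one (pattern : String) (text : String) : Option Bool :=
  checkA pattern.toList text.toList

-- ===== PORT B =====
-- Source B's while-loop compiling the pattern into tokens; none = Source B raises ValueError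
def tokensB : List Char → Option (List (Bool × Char))
  | [] => some []
  | c :: rest =>
      if c = '\\' then
        match rest with
        | [] => none                        -- trailing backslash: raise ValueError
        | d :: rest' =>
          if d = '.' ∨ d = '?' ∨ d = '+' ∨ d = '*' ∨ d = '\\' then
            (tokensB rest').map ((true, d) :: ·)
          else none                         -- bad escape: raise ValueError
      else (tokensB rest).map ((false, c) :: ·)

-- Source B's for-loop: remaining tokens against remaining text (tokens[j:], text[j:])
def matchTokens : List (Bool × Char) → List Char → Bool
  | [], _ => true
  | (lit, c) :: toks, [] => decide (((lit, c) :: toks) = [(false, '$')])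
  | (lit, c) :: toks, t0 :: trest =>
      if lit then (if c ≠ t0 then false else matchTokens toks trest)
      else if c ≠ '.' ∧ c ≠ t0 then false else matchTokens toks trest

def check_one_by_one_alt (pattern : String) (text : String) : Option Bool :=
  match tokensB pattern.toList with
  | none => none                            -- Source B raises here (outside Pre_; dummy value)
  | some toks => some (matchTokens toks text.toList)

-- ===== PRECONDITION & SPEC =====
-- Pre_ excludes ill-formed patterns (a backslash followed by a non-escapable character or ending
-- the pattern): there A's outcome is an accident of its recursion — None, False or IndexError
-- depending on where the text runs out — while B rejects such patterns up front with ValueError.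
-- goodPat is the escape grammar of the PATTERN alone (pat ::= ε | char pat | '\' esc pat), a
-- shape condition checked by eye on the pattern; it never looks at the text and does no matching.
def goodPat : List Char → Bool
  | [] => true
  | '\\' :: rest =>
      match rest with
      | [] => false
      | d :: rest' => (d = '.' ∨ d = '?' ∨ d = '+' ∨ d = '*' ∨ d = '\\') && goodPat rest'
  | _ :: rest => goodPat rest

def Pre_check_one_by_one (pattern : String) (text : String) : Prop :=
  goodPat pattern.toList = true
instance (pattern : String) (text : String) : Decidable (Pre_check_one_by_one pattern text) := by
  unfold Pre_check_one_by_one; infer_instance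

def pvWitness_check_one_by_one : String × String := ("a.c", "abc")

def Spec_check_one_by_one (pattern : String) (text : String) (out : Option Bool) : Prop := out = check_one_by_one_alt pattern text
instance (pattern : String) (text : String) (out : Option Bool) : Decidable (Spec_check_one_by_one pattern text out) := by unfold Spec_check_one_by_one; infer_instance

-- ===== CLAIM (what is proved, stated in full; the proofs are below) =====
def Claim_equal_check_one_by_one : Prop := ∀ (pattern : String) (text : String), Dom_check_one_by_one pattern text → Pre_check_one_by_one pattern text → Spec_check_one_by_one pattern text (check_one_by_one pattern text)

-- ===== LEMMAS AND PROOFS =====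

-- a well-formed pattern tokenizes successfully
lemma tokensB_good (p : List Char) (hg : goodPat p = true) : ∃ toks, tokensB p = some toks := by
  induction p using tokensB.induct with
  | case1 => exact ⟨[], rfl⟩
  | case2 => simp [goodPat] at hg
  | case3 d rest' hd ih =>
      obtain ⟨toks, htoks⟩ := ih (by simpa [goodPat, hd] using hg)
      exact ⟨(true, d) :: toks, by simp [tokensB, hd, htoks]⟩
  | case4 d rest' hd => simp [goodPat, hd] at hg
  | case5 c rest hc ih =>
      obtain ⟨toks, htoks⟩ := ih (by rw [goodPat.eq_def] at hg; cases c' : rest <;> simpa [hc, c'] using hg)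
      exact ⟨(false, c) :: toks, by rw [tokensB.eq_def]; simp [hc, htoks]⟩

-- an empty token list comes only from the empty pattern
lemma tokensB_nil (p : List Char) (h : tokensB p = some []) : p = [] := by
  induction p using tokensB.induct with
  | case1 => rfl
  | case2 => simp [tokensB] at h
  | case3 d rest' hd ih => simp [tokensB, hd] at h
  | case4 d rest' hd => simp [tokensB, hd] at h
  | case5 c rest hc ih => rw [tokensB.eq_def] at h; simp [hc] at h

-- main invariant: A's recursion equals B's tokenize-then-match on well-formed patterns
lemma checkA_eq (p t : List Char) (toks : List (Bool × Char))
    (hg : goodPat p = true) (htoks : tokensB p = some toks) :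
    checkA p t = some (matchTokens toks t) := by
  induction p using tokensB.induct generalizing t toks with
  | case1 =>
      simp [tokensB] at htoks
      subst htoks
      cases t <;> simp [checkA, matchTokens]
  | case2 => simp [goodPat] at hg
  | case3 d rest' hd ih =>
      have hg' : goodPat rest' = true := by simpa [goodPat, hd] using hg
      simp [tokensB, hd] at htoks
      obtain ⟨t', ht', rfl⟩ := htoks
      cases t with
      | nil => simp [checkA, matchTokens]
      | cons t0 trest =>
          simp only [checkA, hd, if_true, check_single_char, matchTokens]
          by_cases h : d = t0
          · simp [h, ih trest t' hg' ht']
          · simp [h]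
  | case4 d rest' hd => simp [goodPat, hd] at hg
  | case5 c rest hc ih =>
      have hg' : goodPat rest = true := by
        rw [goodPat.eq_def] at hg; cases c' : rest <;> simpa [hc, c'] using hg
      rw [tokensB.eq_def] at htoks
      simp [hc] at htoks
      obtain ⟨t', ht', rfl⟩ := htoks
      cases t with
      | nil =>
          have hA : checkA (c :: rest) [] =
              if c = '$' ∧ rest = [] then some true else some false := by
            rw [checkA.eq_def]
          rw [hA]
          simp only [matchTokens]
          by_cases hdollar : c = '$' ∧ rest = []
          · obtain ⟨rfl, rfl⟩ := hdollar
            simp [tokensB] at ht'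
            subst ht'
            simp
          · have hne : ¬ ((false, c) :: t' = [(false, '$')]) := by
              intro h
              simp at h
              exact hdollar ⟨h.1, tokensB_nil rest (h.2 ▸ ht')⟩
            simp [hdollar, hne]
      | cons t0 trest =>
          have hA : checkA (c :: rest) (t0 :: trest) =
              if check_single_char [c] [t0] false then checkA rest trest else some false := by
            rw [checkA.eq_def]; simp [hc]
          rw [hA]
          simp only [check_single_char, matchTokens]
          by_cases h1 : c = t0
          · simp [h1, ih trest t' hg' ht']
          · by_cases h2 : c = '.'
            · simp [h2, ih trest t' hg' ht']
            · simp [h1, h2]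

-- ===== VERDICT (by name: the statement is the Claim_ definition above) =====
theorem check_one_by_one_spec : Claim_equal_check_one_by_one := by
  intro pattern text _ hpre
  unfold Spec_check_one_by_one check_one_by_one check_one_by_one_alt
  obtain ⟨toks, htoks⟩ := tokensB_good pattern.toList hpre
  rw [htoks]
  exact checkA_eq pattern.toList text.toList toks hpre htoks
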